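-- pv_equiv track=rewrite | github.com/rajul/Timus | 1404/encrypt.py | decouple_last_op
-- ===== SOURCE A (Python) =====
-- def decouple_last_op(chars):
-- 	nums = [chars[0],]
--
-- 	multiplier = 0
-- 	for i in range(1, len(chars)):
-- 		if chars[i] < chars[i - 1]:
-- 			multiplier = multiplier + 1
--
-- 		nums.append(multiplier * 26 + chars[i])
--
-- 	return nums
-- ===== SOURCE B (Python) =====
-- def decouple_last_op(chars):
--     # Group chars into maximal non-descending runs; the multiplier of an
--     # element is simply the index of its run.
--     runs = [[chars[0]]]
--     for c in chars[1:]: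
--         if c < runs[-1][-1]:
--             runs.append([c])
--         else:
--             runs[-1].append(c)
--     return [k * 26 + c for k, run in enumerate(runs) for c in run]
-- ===== Notes on version B (the rewrite author's own statement) =====
-- stated objective: alternative
-- what changed: Instead of A's indexed loop carrying a running multiplier, B groups the list into maximal non-descending runs and then renders each element as (run index)*26 + value, so the multiplier is never maintained as loop state.
import Mathlib
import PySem

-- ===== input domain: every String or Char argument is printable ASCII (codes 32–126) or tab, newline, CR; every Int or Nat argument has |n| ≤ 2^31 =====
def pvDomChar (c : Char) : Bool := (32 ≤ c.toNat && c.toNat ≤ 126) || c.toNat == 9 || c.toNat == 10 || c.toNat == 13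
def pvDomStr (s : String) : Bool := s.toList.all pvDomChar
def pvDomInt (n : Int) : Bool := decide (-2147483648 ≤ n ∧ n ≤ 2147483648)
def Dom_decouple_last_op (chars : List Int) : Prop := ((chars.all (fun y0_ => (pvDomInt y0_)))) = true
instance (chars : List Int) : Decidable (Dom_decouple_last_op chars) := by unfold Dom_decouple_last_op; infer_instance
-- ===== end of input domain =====

-- B groups the input into maximal non-descending runs and renders element = run-index*26 + value, instead of A's indexed loop with a running multiplier (alternative decomposition, same cost).


-- ===== PORT A =====
-- Literal port of A: nums = [chars[0]]; for i in range(1, len(chars)): update multiplier, append.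
def decouple_last_op (chars : List Int) : List Int :=
  match chars with
  | [] => []  -- unreachable under Pre_ (Python raises IndexError on chars[0])
  | c0 :: _ =>
    (((PySem.List.pyRange 1 (chars.length : Int) 1).foldl
      (fun (st : List Int × Int) i =>
        let m := if PySem.List.pyGetD chars i 0 < PySem.List.pyGetD chars (i - 1) 0
                 then st.2 + 1 else st.2
        (st.1 ++ [m * 26 + PySem.List.pyGetD chars i 0], m))
      ([c0], 0)).1)

-- ===== PORT B =====
-- Source B's loop body: c < runs[-1][-1] → start a new run, else append to the last run.
-- (runs is never empty and its runs are never empty, so the getLastD defaults are never consulted.)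
def pvStep (runs : List (List Int)) (c : Int) : List (List Int) :=
  if c < (runs.getLastD []).getLastD 0 then runs ++ [[c]]
  else runs.dropLast ++ [(runs.getLastD []) ++ [c]]

-- Source B's final comprehension [k*26 + c for k, run in enumerate(runs) for c in run]
def pvRender (k : Int) : List (List Int) → List Int
  | [] => []
  | r :: rs => r.map (fun c => k * 26 + c) ++ pvRender (k + 1) rs

def decouple_last_op_alt (chars : List Int) : List Int :=
  match chars with
  | [] => []  -- unreachable under Pre_
  | c0 :: rest => pvRender 0 (rest.foldl pvStep [[c0]])

-- ===== PRECONDITION & SPEC =====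
-- Pre_ excludes only the empty list, on which A raises IndexError (chars[0]).
def Pre_decouple_last_op (chars : List Int) : Prop := chars ≠ []
instance (chars : List Int) : Decidable (Pre_decouple_last_op chars) := by unfold Pre_decouple_last_op; infer_instance
def pvWitness_decouple_last_op : List Int := [3, 1, 2]

def Spec_decouple_last_op (chars : List Int) (out : List Int) : Prop := out = decouple_last_op_alt chars
instance (chars : List Int) (out : List Int) : Decidable (Spec_decouple_last_op chars out) := by unfold Spec_decouple_last_op; infer_instance

-- ===== CLAIM (what is proved, stated in full; the proofs are below) =====
def Claim_equal_decouple_last_op : Prop := ∀ (chars : List Int), Dom_decouple_last_op chars → Pre_decouple_last_op chars → Spec_decouple_last_op chars (decouple_last_op chars)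

-- ===== LEMMAS AND PROOFS =====

-- common recursive characterisation: previous value p, multiplier m, remaining suffix
def pvGo (p m : Int) : List Int → List Int
  | [] => []
  | x :: xs =>
    let m' := if x < p then m + 1 else m
    (m' * 26 + x) :: pvGo x m' xs

-- A's loop from index k onward equals pvGo on the suffix
lemma loopA (chars : List Int) (k : Nat) (hk : 1 ≤ k) (acc : List Int) (m : Int) :
    ((PySem.List.pyRange (k : Int) (chars.length : Int) 1).foldl
      (fun (st : List Int × Int) i =>
        let m := if PySem.List.pyGetD chars i 0 < PySem.List.pyGetD chars (i - 1) 0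
                 then st.2 + 1 else st.2
        (st.1 ++ [m * 26 + PySem.List.pyGetD chars i 0], m))
      (acc, m)).1
    = acc ++ pvGo (chars.getD (k - 1) 0) m (chars.drop k) := by
  by_cases h : k < chars.length
  · have hcons := PySem.List.pyRange_one_cons (a := (k : Int)) (b := (chars.length : Int))
      (by exact_mod_cast h)
    rw [hcons]
    simp only [List.foldl_cons]
    have hk1 : ((k : Int)) - 1 = ((k - 1 : Nat) : Int) := by omega
    have hgk : PySem.List.pyGetD chars ((k : Int)) 0 = chars[k] := by
      rw [PySem.List.pyGetD_natCast]; exact List.getD_eq_getElem _ _ h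
    have hgk1 : PySem.List.pyGetD chars ((k : Int) - 1) 0 = chars[k - 1] := by
      rw [hk1, PySem.List.pyGetD_natCast]; exact List.getD_eq_getElem _ _ (by omega)
    have hdrop : chars.drop k = chars[k] :: chars.drop (k + 1) :=
      List.drop_eq_getElem_cons h
    have hsucc : ((k : Int)) + 1 = ((k + 1 : Nat) : Int) := by omega
    rw [hgk, hgk1, hsucc]
    rw [loopA chars (k + 1) (by omega) _ _]
    have hgd : chars.getD (k + 1 - 1) 0 = chars[k] := List.getD_eq_getElem _ _ h
    rw [hgd, hdrop]
    have hgd1 : chars.getD (k - 1) 0 = chars[k - 1] := List.getD_eq_getElem _ _ (by omega)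
    rw [hgd1]
    simp only [pvGo, List.append_assoc, List.singleton_append]
  · have hnil : PySem.List.pyRange (k : Int) (chars.length : Int) 1 = [] :=
      PySem.List.pyRange_one_eq_nil (by exact_mod_cast Nat.le_of_not_lt h)
    rw [hnil, List.drop_eq_nil_of_le (Nat.le_of_not_lt h)]
    simp [pvGo]
termination_by chars.length - k
decreasing_by omega

-- rendering distributes over appending one run at the end
lemma pvRender_append (k : Int) (R : List (List Int)) (r : List Int) :
    pvRender k (R ++ [r]) = pvRender k R ++ r.map (fun c => (k + R.length) * 26 + c) := by
  induction R generalizing k with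
  | nil => simp [pvRender]
  | cons s R ih =>
    simp only [List.cons_append, pvRender, ih, List.length_cons, List.append_assoc]
    norm_num
    ring_nf
    simp

-- unfolding one step of pvGo
lemma pvGo_cons (p m x : Int) (xs : List Int) :
    pvGo p m (x :: xs)
    = ((if x < p then m + 1 else m) * 26 + x) :: pvGo x (if x < p then m + 1 else m) xs := rfl

-- B's run-building fold, rendered, equals pvGo on the suffix
lemma foldB (xs : List Int) : ∀ (R : List (List Int)) (r : List Int), r ≠ [] →
    pvRender 0 (List.foldl pvStep (R ++ [r]) xs)
    = pvRender 0 (R ++ [r]) ++ pvGo (r.getLastD 0) (R.length : Int) xs := by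
  induction xs with
  | nil => intro R r _; simp [pvGo]
  | cons x xs ih =>
    intro R r hr
    have hlast : (R ++ [r]).getLastD [] = r := by simp
    have hlen : (((R ++ [r]).length : Int)) = (R.length : Int) + 1 := by simp
    simp only [List.foldl_cons, pvStep, hlast]
    rw [pvGo_cons]
    by_cases h : x < r.getLastD 0
    · rw [if_pos h, ih (R ++ [r]) [x] (by simp)]
      have h1 : ([x] : List Int).getLastD 0 = x := rfl
      rw [h1, pvRender_append 0 (R ++ [r]) [x], hlen]
      rw [List.getLastD_eq_getLast?] at h
      simp [List.append_assoc, h]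
    · rw [if_neg h]
      have hdl : (R ++ [r]).dropLast = R := by simp
      rw [hdl, ih R (r ++ [x]) (by simp)]
      have hgl : (r ++ [x]).getLastD 0 = x := by simp
      rw [hgl, pvRender_append 0 R (r ++ [x]), pvRender_append 0 R r]
      rw [List.getLastD_eq_getLast?] at h
      simp [List.append_assoc, h]

-- ===== VERDICT (by name: the statement is the Claim_ definition above) =====
theorem decouple_last_op_spec : Claim_equal_decouple_last_op := by
  intro chars _ hpre
  unfold Spec_decouple_last_op
  match chars, hpre with
  | c0 :: rest, _ =>
    show decouple_last_op (c0 :: rest) = decouple_last_op_alt (c0 :: rest)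
    unfold decouple_last_op decouple_last_op_alt
    simp only
    have hl := loopA (c0 :: rest) 1 le_rfl [c0] 0
    simp only [Nat.cast_one] at hl
    rw [hl]
    have hb := foldB rest [] [c0] (by simp)
    simp only [List.nil_append, List.length_nil, Nat.cast_zero] at hb
    rw [hb]
    simp [pvRender]
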